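-- pv_equiv track=rewrite | github.com/sefzig/PDL | packages/py/pdl/pdl.py | find_header_end
-- ===== SOURCE A (Python) =====
-- def find_header_end(s: str) -> int:
--     in_str = False
--     esc = False
--     depth = 0
--     for i, ch in enumerate(s):
--         if esc:
--             esc = False
--             continue
--         if ch == "\\" and in_str:
--             esc = True
--             continue
--         if ch == '"':
--             in_str = not in_str
--             continue
--         if not in_str:
--             if ch == "[":
--                 depth += 1
--                 continue
--             if ch == "]":
--                 if depth == 0:
--                     return i
--                 depth -= 1
--     return -1
-- ===== SOURCE B (Python) =====
-- def find_header_end(s: str) -> int: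
--     n = len(s)
--     i = 0
--     depth = 0
--     while i < n:
--         c = s[i]
--         if c == '"':
--             # consume the whole string literal so the scan never sees its contents
--             i += 1
--             while i < n:
--                 if s[i] == "\\":
--                     i += 2
--                 elif s[i] == '"':
--                     i += 1
--                     break
--                 else:
--                     i += 1
--         elif c == "[":
--             depth += 1
--             i += 1
--         elif c == "]":
--             if depth == 0:
--                 return i
--             depth -= 1
--             i += 1
--         else:
--             i += 1
--     return -1
-- ===== Notes on version B (the rewrite author's own statement) =====
-- stated objective: alternative
-- what changed: Replaced A's single pass with three boolean/escape state flags by an index scan with a depth counter whose inner loop consumes each quoted string literal (including backslash-escape pairs) in one go, so the bracket logic never carries string state.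
import Mathlib
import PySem

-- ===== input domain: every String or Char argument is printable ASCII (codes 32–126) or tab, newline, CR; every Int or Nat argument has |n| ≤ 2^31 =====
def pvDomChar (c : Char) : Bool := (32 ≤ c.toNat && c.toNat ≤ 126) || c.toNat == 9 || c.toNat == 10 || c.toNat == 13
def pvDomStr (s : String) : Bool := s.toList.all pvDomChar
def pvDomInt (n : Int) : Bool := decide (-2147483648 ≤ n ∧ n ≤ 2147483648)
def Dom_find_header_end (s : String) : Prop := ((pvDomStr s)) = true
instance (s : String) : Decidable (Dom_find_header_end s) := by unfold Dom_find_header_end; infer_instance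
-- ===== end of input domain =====

-- B replaces A's three-flag state machine by an index scan whose inner loop consumes a
-- whole string literal at once (alternative decomposition; same cost).

-- ===== PORT A =====
-- literal port of A's enumerate-loop: state (in_str, esc, depth), index i
def pdlA : List Char → Bool → Bool → Int → Int → Int
  | [], _, _, _, _ => -1
  | ch :: rest, in_str, esc, depth, i =>
    if esc then pdlA rest in_str false depth (i+1)
    else if ch == '\\' && in_str then pdlA rest in_str true depth (i+1)
    else if ch == '"' then pdlA rest (!in_str) esc depth (i+1)
    else if !in_str then
      (if ch == '[' then pdlA rest in_str esc (depth+1) (i+1)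
       else if ch == ']' then
         (if depth == 0 then i else pdlA rest in_str esc (depth-1) (i+1))
       else pdlA rest in_str esc depth (i+1))
    else pdlA rest in_str esc depth (i+1)

def find_header_end (s : String) : Int := pdlA s.toList false false 0 0

-- ===== PORT B =====
-- outer scan (outside any string literal) / inner skip of one string literal
mutual
def pdlBouter : List Char → Int → Int → Int
  | [], _, _ => -1
  | c :: rest, depth, i =>
    if c == '"' then pdlBinner rest depth (i+1)
    else if c == '[' then pdlBouter rest (depth+1) (i+1)
    else if c == ']' then
      (if depth == 0 then i else pdlBouter rest (depth-1) (i+1))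
    else pdlBouter rest depth (i+1)

def pdlBinner : List Char → Int → Int → Int
  | [], _, _ => -1
  | c :: rest, depth, i =>
    if c == '\\' then
      match rest with
      | [] => -1
      | _ :: rest2 => pdlBinner rest2 depth (i+2)
    else if c == '"' then pdlBouter rest depth (i+1)
    else pdlBinner rest depth (i+1)
end

def find_header_end_alt (s : String) : Int := pdlBouter s.toList 0 0

-- ===== PRECONDITION & SPEC =====
def Spec_find_header_end (s : String) (out : Int) : Prop := out = find_header_end_alt s
instance (s : String) (out : Int) : Decidable (Spec_find_header_end s out) := by unfold Spec_find_header_end; infer_instance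

-- ===== CLAIM (what is proved, stated in full; the proofs are below) =====
def Claim_equal_find_header_end : Prop := ∀ (s : String), Dom_find_header_end s → Spec_find_header_end s (find_header_end s)

-- ===== LEMMAS AND PROOFS =====

theorem pdl_key : ∀ (n : Nat) (l : List Char), l.length ≤ n → ∀ (depth i : Int),
    pdlA l false false depth i = pdlBouter l depth i ∧
    pdlA l true false depth i = pdlBinner l depth i := by
  intro n
  induction n with
  | zero =>
    intro l hl depth i
    have : l = [] := List.length_eq_zero_iff.mp (Nat.le_zero.mp hl)
    subst this
    simp [pdlA, pdlBouter, pdlBinner]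
  | succ n ih =>
    intro l hl depth i
    cases l with
    | nil => simp [pdlA, pdlBouter, pdlBinner]
    | cons c rest =>
      have hr : rest.length ≤ n := Nat.le_of_succ_le_succ hl
      constructor
      · -- outside a string: in_str = false, esc = false
        simp only [pdlA, pdlBouter, Bool.and_false, if_false]
        by_cases hq : c = '"'
        · simp [hq, (ih rest hr depth (i+1)).2]
        · by_cases hb : c = '['
          · simp [hq, hb, (ih rest hr (depth+1) (i+1)).1]
          · by_cases hc : c = ']'
            · by_cases hd : depth = 0
              · simp [hq, hb, hc, hd]
              · simp [hq, hb, hc, hd, (ih rest hr (depth-1) (i+1)).1]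
            · simp [hq, hb, hc, (ih rest hr depth (i+1)).1]
      · -- inside a string: in_str = true, esc = false
        by_cases hs : c = '\\'
        · -- backslash: A escapes the next char; B drops two chars at once
          cases rest with
          | nil => simp [hs, pdlA, pdlBinner]
          | cons c2 rest2 =>
            have hr2 : rest2.length ≤ n := by simp at hl; omega
            have h := (ih rest2 hr2 depth (i+2)).2
            have e2 : i + 1 + 1 = i + 2 := by ring
            simp [hs, pdlA, pdlBinner, e2, h]
        · by_cases hq : c = '"'
          · rw [pdlBinner.eq_def]; simp [hs, hq, pdlA, (ih rest hr depth (i+1)).1]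
          · rw [pdlBinner.eq_def]; simp [hs, hq, pdlA, (ih rest hr depth (i+1)).2]

-- ===== VERDICT (by name: the statement is the Claim_ definition above) =====
theorem find_header_end_spec : Claim_equal_find_header_end := by
  intro s _
  unfold Spec_find_header_end find_header_end find_header_end_alt
  exact (pdl_key s.toList.length s.toList le_rfl 0 0).1
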